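-- pv_equiv track=rewrite | github.com/dmitriyyas/bmstu-iu7-compilers | lab1/regularExpression.py | convertStarPrority
-- ===== SOURCE A (Python) =====
-- def convertStarPrority(regex: str) -> str:
--     i = 1
--     while i < len(regex):
--         if regex[i] == "*":
--             if regex[i - 1] != ")":
--                 regex = f"{regex[:i - 1]}({regex[i - 1:i + 1]}){regex[i + 1:]}"
--             else:
--                 openingBracketIndex = findOpeningBracketIndex(regex, i - 1)
--                 regex = f"{regex[:openingBracketIndex]}({regex[openingBracketIndex:i + 1]}){regex[i + 1:]}"
--             i += 2
--         i += 1
--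
--     return regex
--
-- def findOpeningBracketIndex(regex: str, closingBracketIndex: int) -> int:
--     regex = regex[:closingBracketIndex][::-1]
--     closingBracketsCount = 0
--     openingBracketIndex = 0
--     for i in range(len(regex)):
--         if regex[i] == ')':
--             closingBracketsCount += 1
--         elif regex[i] == '(':
--             if closingBracketsCount > 0:
--                 closingBracketsCount -= 1
--             else:
--                 openingBracketIndex = i
--                 break
--
--     return closingBracketIndex - openingBracketIndex - 1
-- ===== SOURCE B (Python) =====
-- def convertStarPrority(regex: str) -> str:
--     out = []
--     stack = []      # positions in out of currently-unmatched '('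
--     last = 0        # start position in out of the most recent operand
--     for c in regex:
--         if c == '*' and out:
--             out.insert(last, '(')
--             out.append('*')
--             out.append(')')
--             # last stays: the wrapped group is the new most recent operand
--         elif c == ')':
--             last = stack.pop()
--             out.append(c)
--         else:
--             if c == '(':
--                 stack.append(len(out))
--             last = len(out)
--             out.append(c)
--     return ''.join(out)
-- ===== Notes on version B (the rewrite author's own statement) =====
-- stated objective: alternative
-- what changed: A repeatedly re-slices the whole string and re-scans the prefix backwards for each star; B makes a single left-to-right pass that builds the output once, keeping a stack of unmatched open-bracket positions and the start index of the most recent operand, so each star becomes one local list insert instead of a full-string rebuild and backward scan. Pre_ excludes regexes containing an unmatched closing bracket (malformed input), on which A's backward scan falls through and slices with stale or negative indices producing accidental output, while B's stack pop raises IndexError.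
-- outside the precondition, e.g. on convertStarPrority(')'): A returns ')', B raises IndexError; on convertStarPrority('ab)*'): A returns 'a(b)*)', B raises IndexError
import Mathlib
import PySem

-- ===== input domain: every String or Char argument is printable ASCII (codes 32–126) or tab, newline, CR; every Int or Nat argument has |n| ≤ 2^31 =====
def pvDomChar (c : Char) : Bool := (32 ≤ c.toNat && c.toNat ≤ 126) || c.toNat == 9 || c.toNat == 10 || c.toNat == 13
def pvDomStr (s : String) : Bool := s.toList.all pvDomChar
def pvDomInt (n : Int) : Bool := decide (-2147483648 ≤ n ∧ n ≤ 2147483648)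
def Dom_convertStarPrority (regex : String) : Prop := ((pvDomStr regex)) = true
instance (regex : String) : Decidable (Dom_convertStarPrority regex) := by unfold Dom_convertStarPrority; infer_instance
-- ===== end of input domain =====

-- B replaces A's per-star full-string re-slicing and backward prefix re-scans with one
-- left-to-right pass that builds the output once (objective: alternative algorithm, same cost).

-- ===== PORT A =====

-- the for-loop of findOpeningBracketIndex: scans chars with running index i and
-- closingBracketsCount cnt; returns openingBracketIndex (0 if the loop completes, as in Python)
def fobLoop : List Char → Nat → Nat → Nat
  | [], _, _ => 0
  | c :: cs, i, cnt =>
    if c = ')' then fobLoop cs (i + 1) (cnt + 1)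
    else if c = '(' then (if cnt > 0 then fobLoop cs (i + 1) (cnt - 1) else i)
    else fobLoop cs (i + 1) cnt

-- closingBracketIndex is i-1 ≥ 0 at every call, so the Nat slice regex[:c] is exact
def findOpeningBracketIndexA (regex : List Char) (closingBracketIndex : Nat) : Int :=
  (closingBracketIndex : Int) - (fobLoop ((regex.take closingBracketIndex).reverse) 0 0 : Int) - 1

-- A's while loop.  i ≥ 1 at every call (starts at 1, only increases), so the Nat
-- subtraction i-1 and the Nat slices regex[:i-1], regex[i-1:i+1] are exact; regex[i-1]
-- is in range (i-1 < i < len), ported as getD.  gas = len(regex) - i, the quantity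
-- Python's loop strictly decreases (an insertion adds 2 chars while i advances 3);
-- it is used only for termination.
def goA : List Char → Nat → Nat → List Char
  | regex, _, 0 => regex
  | regex, i, gas + 1 =>
    if h : i < regex.length then
      if regex[i] = '*' then
        if regex.getD (i - 1) ' ' ≠ ')' then
          goA (regex.take (i - 1) ++ '(' :: ((regex.drop (i - 1)).take 2 ++ ')' :: regex.drop (i + 1))) (i + 3) gas
        else
          let obi := findOpeningBracketIndexA regex (i - 1)
          goA (PySem.List.slice regex none (some obi) ++
                '(' :: (PySem.List.slice regex (some obi) (some ((i : Int) + 1)) ++ ')' :: regex.drop (i + 1)))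
              (i + 3) gas
      else goA regex (i + 1) gas
    else regex

def convertStarPrority (regex : String) : String :=
  String.ofList (goA regex.toList 1 (regex.toList.length - 1))

-- ===== PORT B =====

-- Source B's single pass: out = output built so far, stack = positions in out of currently
-- unmatched '(' (top at head; Python appends/pops at the right end), last = start in out
-- of the most recent operand.  Python's stack.pop() on an empty stack raises IndexError
-- (outside Pre_); the port returns out there.
def goB : List Char → List Char → List Nat → Nat → List Char
  | [], out, _, _ => out
  | c :: cs, out, stack, last =>
    if c = '*' ∧ out ≠ [] then
      goB cs ((PySem.List.insert out (last : Int) '(' ++ ['*']) ++ [')']) stack last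
    else if c = ')' then
      match stack with
      | p :: rest => goB cs (out ++ [c]) rest p
      | [] => out
    else
      goB cs (out ++ [c]) (if c = '(' then out.length :: stack else stack) out.length

def convertStarPrority_alt (regex : String) : String :=
  String.ofList (goB regex.toList [] [] 0)

-- ===== PRECONDITION & SPEC =====

-- Pre_ excludes regexes containing an unmatched ')' (a prefix whose ')' count exceeds its '(' count):
-- malformed input, on which A's backward bracket scan falls through and slices with stale
-- or negative indices (accidental output) while B's stack pop raises IndexError.
def Pre_convertStarPrority (regex : String) : Prop :=
  ∀ n < regex.toList.length + 1,
    (regex.toList.take n).count ')' ≤ (regex.toList.take n).count '('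
instance (regex : String) : Decidable (Pre_convertStarPrority regex) := by
  unfold Pre_convertStarPrority; infer_instance

def pvWitness_convertStarPrority : String := "(a(bc)*)*d*"

def Spec_convertStarPrority (regex : String) (out : String) : Prop := out = convertStarPrority_alt regex
instance (regex : String) (out : String) : Decidable (Spec_convertStarPrority regex out) := by unfold Spec_convertStarPrority; infer_instance

-- ===== CLAIM (what is proved, stated in full; the proofs are below) =====
def Claim_equal_convertStarPrority : Prop := ∀ (regex : String), Dom_convertStarPrority regex → Pre_convertStarPrority regex → Spec_convertStarPrority regex (convertStarPrority regex)

-- ===== LEMMAS AND PROOFS =====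

def Bal (v : List Char) : Prop :=
  v.count '(' = v.count ')' ∧ ∀ n, (v.take n).count ')' ≤ (v.take n).count '('

lemma bal_nil : Bal [] := by constructor <;> simp

lemma bal_single {c : Char} (h1 : c ≠ '(') (h2 : c ≠ ')') : Bal [c] := by
  constructor
  · simp [h1, h2]
  · intro n
    cases n <;> simp [h1, h2]

lemma bal_append {x z : List Char} (hx : Bal x) (hz : Bal z) : Bal (x ++ z) := by
  obtain ⟨hx1, hx2⟩ := hx
  obtain ⟨hz1, hz2⟩ := hz
  constructor
  · simp [List.count_append, hx1, hz1]
  · intro n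
    rw [List.take_append, List.count_append, List.count_append]
    have := hx2 n
    have := hz2 (n - x.length)
    omega

lemma bal_of_append {x z : List Char} (h : Bal (x ++ z)) (hz : Bal z) : Bal x := by
  obtain ⟨h1, h2⟩ := h
  obtain ⟨hz1, hz2⟩ := hz
  simp [List.count_append] at h1
  constructor
  · have := h2 x.length
    rw [List.take_append, List.count_append, List.count_append] at this
    simp at this
    omega
  · intro n
    have := h2 n
    rw [List.take_append, List.count_append, List.count_append] at this
    by_cases hn : n ≤ x.length
    · simpa [Nat.sub_eq_zero_of_le hn] using this
    · have hx : x.take n = x := List.take_of_length_le (by omega)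
      have h3 := h2 x.length
      rw [List.take_append, List.count_append, List.count_append] at h3
      simp at h3
      rw [hx]
      omega

lemma count_take_singleton_close (k : Nat) :
    ((([')'] : List Char).take k).count ')' ≤ 1) ∧ ((([')'] : List Char).take k).count '(' = 0) := by
  cases k <;> simp

lemma bal_wrap {w : List Char} (h : Bal w) : Bal ('(' :: (w ++ [')'])) := by
  obtain ⟨h1, h2⟩ := h
  constructor
  · simp [List.count_append, List.count_cons, h1]
  · intro n
    cases n with
    | zero => simp
    | succ m =>
      simp only [List.take_succ_cons, List.count_cons]
      rw [List.take_append, List.count_append, List.count_append]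
      have h4 := count_take_singleton_close (m - w.length)
      have := h2 m
      simp
      omega

def SBal (S : List Char) (d : Nat) : Prop :=
  ∀ n, (S.take n).count ')' ≤ (S.take n).count '(' + d

lemma sbal_head_close {S d} (h : SBal (')' :: S) d) : 1 ≤ d := by
  have := h 1; simp at this; omega

lemma sbal_pop {S d} (h : SBal (')' :: S) (d + 1)) : SBal S d := by
  intro n
  have := h (n + 1)
  simp [List.count_cons] at this
  omega

lemma sbal_push {S d} (h : SBal ('(' :: S) d) : SBal S (d + 1) := by
  intro n
  have := h (n + 1)
  simp [List.count_cons] at this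
  omega

lemma sbal_skip {S d c} (h1 : c ≠ '(') (h2 : c ≠ ')') (h : SBal (c :: S) d) : SBal S d := by
  intro n
  have := h (n + 1)
  simp [h1, h2] at this
  omega

def StkInv : List Nat → List Char → Prop
  | [], out => Bal out
  | p :: rest, out =>
    p < out.length ∧ out.getD p ' ' = '(' ∧ Bal (out.drop (p + 1)) ∧ StkInv rest (out.take p)


lemma stkInv_lt_length : ∀ (st : List Nat) (out : List Char), StkInv st out → ∀ p ∈ st, p < out.length := by
  intro st
  induction st with
  | nil => intro out h p hp; simp at hp
  | cons q rest ih =>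
    intro out h p hp
    obtain ⟨hq, _, _, hchain⟩ := h
    rw [List.mem_cons] at hp
    rcases hp with hp | hp
    · subst hp
      exact hq
    · have := ih _ hchain p hp
      have : p < (out.take q).length := this
      simp at this
      omega

lemma stkInv_append_bal {st : List Nat} {out z : List Char} (h : StkInv st out) (hz : Bal z) :
    StkInv st (out ++ z) := by
  cases st with
  | nil => exact bal_append h hz
  | cons p rest =>
    obtain ⟨hp, hc, hb, hchain⟩ := h
    refine ⟨by simp; omega, ?_, ?_, ?_⟩
    · rw [List.getD_append _ _ _ _ hp]; exact hc
    · rw [List.drop_append_of_le_length (by omega)]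
      exact bal_append hb hz
    · rw [List.take_append_of_le_length (by omega)]
      exact hchain

lemma stkInv_strip_bal {st : List Nat} {out z : List Char} (h : StkInv st (out ++ z))
    (hz : Bal z) (hlt : ∀ p ∈ st, p < out.length) : StkInv st out := by
  cases st with
  | nil => exact bal_of_append h hz
  | cons p rest =>
    obtain ⟨hp, hc, hb, hchain⟩ := h
    have hpo : p < out.length := hlt p (by simp)
    refine ⟨hpo, ?_, ?_, ?_⟩
    · rw [List.getD_append _ _ _ _ hpo] at hc; exact hc
    · rw [List.drop_append_of_le_length (by omega)] at hb
      exact bal_of_append hb hz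
    · rw [List.take_append_of_le_length (by omega)] at hchain
      exact hchain

-- ===== the backward scan =====

lemma fobLoop_skip : ∀ (cs rest : List Char) (i cnt : Nat),
    (∀ q r, cs = q ++ '(' :: r → q.count '(' < cnt + q.count ')') →
    cs.count '(' ≤ cnt + cs.count ')' ∧
    fobLoop (cs ++ rest) i cnt = fobLoop rest (i + cs.length) (cnt + cs.count ')' - cs.count '(') := by
  intro cs
  induction cs with
  | nil => intro rest i cnt h; simp [fobLoop]
  | cons c cs ih =>
    intro rest i cnt h
    by_cases hc : c = ')'
    · subst hc
      have hgood : ∀ q r, cs = q ++ '(' :: r → q.count '(' < (cnt + 1) + q.count ')' := by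
        intro q r hq
        have := h (')' :: q) r (by simp [hq])
        simp [List.count_cons] at this
        omega
      obtain ⟨h1, h2⟩ := ih rest (i + 1) (cnt + 1) hgood
      constructor
      · simp [List.count_cons]; omega
      · have step : fobLoop ((')' :: cs) ++ rest) i cnt = fobLoop (cs ++ rest) (i + 1) (cnt + 1) := rfl
        have harg1 : i + 1 + cs.length = i + (')' :: cs).length := by simp; omega
        have harg2 : cnt + 1 + cs.count ')' - cs.count '(' = cnt + (')' :: cs).count ')' - (')' :: cs).count '(' := by
          simp [List.count_cons]; omega
        rw [step, h2, harg1, harg2]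
    · by_cases hc2 : c = '('
      · subst hc2
        have hcnt : 0 < cnt := by
          have := h [] cs (by simp)
          simpa using this
        have hgood : ∀ q r, cs = q ++ '(' :: r → q.count '(' < (cnt - 1) + q.count ')' := by
          intro q r hq
          have := h ('(' :: q) r (by simp [hq])
          simp [List.count_cons] at this
          omega
        obtain ⟨h1, h2⟩ := ih rest (i + 1) (cnt - 1) hgood
        constructor
        · simp [List.count_cons]; omega
        · have step : fobLoop (('(' :: cs) ++ rest) i cnt = if cnt > 0 then fobLoop (cs ++ rest) (i + 1) (cnt - 1) else i := rfl
          have harg1 : i + 1 + cs.length = i + ('(' :: cs).length := by simp; omega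
          have harg2 : cnt - 1 + cs.count ')' - cs.count '(' = cnt + ('(' :: cs).count ')' - ('(' :: cs).count '(' := by
            simp [List.count_cons]; omega
          rw [step, if_pos hcnt, h2, harg1, harg2]
      · have hgood : ∀ q r, cs = q ++ '(' :: r → q.count '(' < cnt + q.count ')' := by
          intro q r hq
          have := h (c :: q) r (by simp [hq])
          simp [List.count_cons, hc2, hc] at this
          omega
        obtain ⟨h1, h2⟩ := ih rest (i + 1) cnt hgood
        constructor
        · simp [List.count_cons, hc, hc2]; omega
        · simp only [List.cons_append, fobLoop, if_neg hc, if_neg hc2]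
          have harg1 : i + 1 + cs.length = i + (c :: cs).length := by simp; omega
          have harg2 : cnt + cs.count ')' - cs.count '(' = cnt + (c :: cs).count ')' - (c :: cs).count '(' := by
            simp [List.count_cons, hc, hc2]
          rw [h2, harg1, harg2]
  
-- scanning the reverse of a balanced block from cnt 0 skips it entirely and breaks
-- at the '(' that follows
lemma fobLoop_bal_reverse {v : List Char} (h : Bal v) (r : List Char) (i : Nat) :
    fobLoop (v.reverse ++ '(' :: r) i 0 = i + v.length := by
  obtain ⟨h1, h2⟩ := h
  have hgood : ∀ q r', v.reverse = q ++ '(' :: r' → q.count '(' < 0 + q.count ')' := by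
    intro q r' hq
    have hv : v = r'.reverse ++ '(' :: q.reverse := by
      have := congrArg List.reverse hq
      simpa using this
    have hpre := h2 r'.reverse.length
    have htake : v.take r'.reverse.length = r'.reverse := by
      rw [hv]
      exact List.take_left ..
    rw [htake] at hpre
    have htot : v.count '(' = v.count ')' := h1
    rw [hv] at htot
    simp [List.count_append, List.count_cons] at htot
    simp only [List.count_reverse] at hpre htot ⊢
    omega
  obtain ⟨h1', h2'⟩ := fobLoop_skip v.reverse ('(' :: r) i 0 hgood
  rw [h2']
  have hz : 0 + v.reverse.count ')' - v.reverse.count '(' = 0 := by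
    simp [List.count_reverse]; omega
  rw [hz]
  simp [fobLoop]

def ShapeB (a : Nat) (B : List Char) : Prop :=
  (a = 1 ∧ B = []) ∨
  (a = 0 ∧ ∃ c, B = [c] ∧ c ≠ '(' ∧ c ≠ ')') ∨
  (∃ w, B = '(' :: (w ++ [')']) ∧ Bal w)

lemma shapeB_bal {a B} (h : ShapeB a B) : Bal B := by
  rcases h with ⟨_, rfl⟩ | ⟨_, c, rfl, h1, h2⟩ | ⟨w, rfl, hw⟩
  · exact bal_nil
  · exact bal_single h1 h2
  · exact bal_wrap hw

def BInv (out : List Char) (stack : List Nat) (last : Nat) : Prop :=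
  StkInv stack out ∧ last ≤ out.length ∧
  ∃ a B rest,
    out.drop last = List.replicate a '(' ++ B ∧ ShapeB a B ∧
    stack = ((List.range a).map (fun j => last + (a - 1 - j))) ++ rest ∧
    (∀ p ∈ rest, p < last)

lemma insert_run {out z : List Char} {p k : Nat}
    (h : out.drop p = List.replicate k '(' ++ z) (hp : p ≤ out.length) :
    out.take (p + k) ++ '(' :: out.drop (p + k) = out.take p ++ '(' :: out.drop p := by
  have ht : out.take (p + k) = out.take p ++ List.replicate k '(' := by
    rw [List.take_add, h, List.take_append_of_le_length (by simp), List.take_replicate]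
    simp
  have hd : out.drop (p + k) = z := by
    have : out.drop (p + k) = (out.drop p).drop k := by rw [List.drop_drop, Nat.add_comm]
    rw [this, h, List.drop_append_of_le_length (by simp)]
    simp
  rw [ht, hd, h, List.append_assoc]
  congr 1
  rw [show ('(' :: (List.replicate k '(' ++ z) : List Char) = List.replicate (k+1) '(' ++ z by
        simp [List.replicate_succ]]
  rw [show (List.replicate (k+1) '(' : List Char) = List.replicate k '(' ++ ['('] from List.replicate_succ' ..]
  simp

lemma binv_app_ord {out : List Char} {stack : List Nat} {last : Nat} {c : Char}
    (hc1 : c ≠ '(') (hc2 : c ≠ ')') (h : BInv out stack last) :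
    BInv (out ++ [c]) stack out.length := by
  obtain ⟨hstk, hlast, a, B, rest, hdec, hshape, hstack, hrest⟩ := h
  refine ⟨stkInv_append_bal hstk (bal_single hc1 hc2), by simp, 0, [c], stack, ?_, ?_, by simp, ?_⟩
  · rw [List.drop_left]; simp
  · exact Or.inr (Or.inl ⟨rfl, c, rfl, hc1, hc2⟩)
  · intro p hp
    exact stkInv_lt_length stack out hstk p hp

lemma binv_app_open {out : List Char} {stack : List Nat} {last : Nat}
    (h : BInv out stack last) :
    BInv (out ++ ['(']) (out.length :: stack) out.length := by
  obtain ⟨hstk, hlast, a, B, rest, hdec, hshape, hstack, hrest⟩ := h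
  refine ⟨⟨by simp, ?_, ?_, ?_⟩, by simp, 1, [], stack, ?_, Or.inl ⟨rfl, rfl⟩, by simp, ?_⟩
  · have : (out ++ ['(']).getD out.length ' ' = '(' := by
      rw [List.getD_eq_getElem _ _ (by simp)]
      simp
    exact this
  · have : (out ++ ['(']).drop (out.length + 1) = [] := by
      apply List.drop_of_length_le; simp
    rw [this]; exact bal_nil
  · rw [List.take_left]; exact hstk
  · rw [List.drop_left]; simp [List.replicate]
  · intro p hp
    exact stkInv_lt_length stack out hstk p hp

lemma binv_app_close {out : List Char} {rest : List Nat} {last p : Nat}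
    (h : BInv out (p :: rest) last) :
    BInv (out ++ [')']) rest p := by
  obtain ⟨hstk, hlast, a, B, rrest, hdec, hshape, hstack, hrrest⟩ := h
  obtain ⟨hp, hc, hb, hchain⟩ := hstk
  have hout : out = out.take p ++ '(' :: out.drop (p + 1) := by
    conv_lhs => rw [← List.take_append_drop p out]
    congr 1
    rw [← List.getElem_cons_drop hp]
    rw [List.getD_eq_getElem _ _ hp] at hc
    rw [hc]
  have hz : Bal ('(' :: (out.drop (p + 1) ++ [')'])) := bal_wrap hb
  refine ⟨?_, by simp; omega, 0, '(' :: (out.drop (p + 1) ++ [')']), rest, ?_, ?_, by simp, ?_⟩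
  · have : out ++ [')'] = out.take p ++ ('(' :: (out.drop (p + 1) ++ [')'])) := by
      conv_lhs => rw [hout]
      simp
    rw [this]
    exact stkInv_append_bal hchain hz
  · have : (out ++ [')']).drop p = out.drop p ++ [')'] := by
      rw [List.drop_append, Nat.sub_eq_zero_of_le (by omega)]
      simp
    rw [this]
    have : out.drop p = '(' :: out.drop (p + 1) := by
      rw [← List.getElem_cons_drop hp]
      rw [List.getD_eq_getElem _ _ hp] at hc
      rw [hc]
    rw [this]
    simp
  · exact Or.inr (Or.inr ⟨out.drop (p + 1), by simp, hb⟩)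
  · intro q hq
    have := stkInv_lt_length rest (out.take p) hchain q hq
    simp at this
    omega

lemma getD_append_cons {u t : List Char} {c : Char} {d : Char} :
    (u ++ c :: t).getD u.length d = c := by
  rw [List.getD_eq_getElem _ _ (by simp)]
  simp

lemma bal_star : Bal ['*'] := bal_single (by decide) (by decide)


lemma take_append_at {u : List Char} (t : List Char) {n : Nat} (h : u.length = n) :
    (u ++ t).take n = u := by subst h; exact List.take_left ..

lemma drop_append_at {u : List Char} (t : List Char) {n : Nat} (h : u.length = n) :
    (u ++ t).drop n = t := by subst h; exact List.drop_left ..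

lemma getD_append_cons_at {u t : List Char} {c d : Char} {n : Nat} (h : u.length = n) :
    (u ++ c :: t).getD n d = c := by subst h; exact getD_append_cons

lemma drop_append_cons_at {u t : List Char} {c : Char} {n : Nat} (h : u.length = n) :
    (u ++ c :: t).drop (n + 1) = t := by
  subst h
  rw [show u ++ c :: t = (u ++ [c]) ++ t by simp,
      show u.length + 1 = (u ++ [c]).length by simp, List.drop_left]

lemma binv_wrap {out : List Char} {stack : List Nat} {last : Nat}
    (h : BInv out stack last) :
    BInv (out.take last ++ '(' :: (out.drop last ++ ['*', ')'])) stack last := by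
  obtain ⟨hstk, hlast, a, B, rest, hdec, hshape, hstack, hrest⟩ := h
  have hBal : Bal B := shapeB_bal hshape
  have hw' : Bal (B ++ ['*']) := bal_append hBal bal_star
  have hz : Bal ('(' :: ((B ++ ['*']) ++ [')'])) := bal_wrap hw'
  have hlenu : (out.take last).length = last := by simp; omega
  have hsplit : out = out.take last ++ (List.replicate a '(' ++ B) := by
    conv_lhs => rw [← List.take_append_drop last out]
    rw [hdec]
  have hznorm : ('(' :: (out.drop last ++ ['*', ')'])) =
      List.replicate a '(' ++ ('(' :: ((B ++ ['*']) ++ [')'])) := by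
    rw [hdec]
    rw [show ('(' :: (List.replicate a '(' ++ B ++ ['*', ')']) : List Char) =
          List.replicate (a+1) '(' ++ (B ++ ['*', ')']) by simp [List.replicate_succ]]
    rw [show (List.replicate (a+1) '(' : List Char) = List.replicate a '(' ++ ['('] from
          List.replicate_succ' ..]
    simp
  -- the new decomposition of the suffix after `last`
  have hdrop : (out.take last ++ '(' :: (out.drop last ++ ['*', ')'])).drop last =
      List.replicate a '(' ++ ('(' :: ((B ++ ['*']) ++ [')'])) := by
    rw [drop_append_at _ hlenu, hznorm]
  refine ⟨?_, by simp; omega, a, '(' :: ((B ++ ['*']) ++ [')']), rest, hdrop,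
      Or.inr (Or.inr ⟨B ++ ['*'], rfl, hw'⟩), hstack, hrest⟩
  -- StkInv is preserved
  cases a with
  | zero =>
    simp only [List.range_zero, List.map_nil, List.nil_append] at hstack
    subst hstack
    have hout0 : out = out.take last ++ B := by simpa using hsplit
    have hbound : ∀ p ∈ stack, p < (out.take last).length := by
      intro p hp; rw [hlenu]; exact hrest p hp
    have hN : StkInv stack (out.take last) := by
      refine stkInv_strip_bal ?_ hBal hbound
      rw [← hout0]; exact hstk
    have := stkInv_append_bal hN hz
    have hfix : ('(' :: ((B ++ ['*']) ++ [')']) : List Char) = '(' :: (out.drop last ++ ['*', ')']) := by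
      rw [hdec]; simp
    rw [hfix] at this
    exact this
  | succ a0 =>
    -- stack = (last + a0) :: tail
    have hrun : (List.range (a0+1)).map (fun j => last + (a0 + 1 - 1 - j)) =
        (last + a0) :: (List.range a0).map (fun j => last + (a0 - (j + 1))) := by
      rw [List.range_succ_eq_map]
      simp [List.map_map, Function.comp]
    rw [hrun] at hstack
    set tail := (List.range a0).map (fun j => last + (a0 - (j + 1))) ++ rest with htail
    rw [hstack] at hstk
    obtain ⟨hp0, hc0, hb0, hchain0⟩ := hstk
    -- out.take (last + a0) = out.take last ++ replicate a0 '('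
    have htka : out.take (last + a0) = out.take last ++ List.replicate a0 '(' := by
      rw [List.take_add]
      congr 1
      rw [hdec, List.take_append_of_le_length (by simp), List.take_replicate]
      congr 1
      omega
    -- the new out, re-associated around position last + a0
    have hform : out.take last ++ '(' :: (out.drop last ++ ['*', ')']) =
        out.take (last + a0) ++ '(' :: ('(' :: (B ++ ['*', ')'])) := by
      rw [htka, hznorm]
      rw [show (List.replicate (a0+1) '(' : List Char) = List.replicate a0 '(' ++ ['('] from
            List.replicate_succ' ..]
      simp
    rw [hstack, hform]
    have hlen2 : (out.take (last + a0)).length = last + a0 := by simp; omega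
    refine ⟨by rw [List.length_append, hlen2]; simp, ?_, ?_, ?_⟩
    · exact getD_append_cons_at hlen2
    · rw [drop_append_cons_at hlen2]
      have : ('(' :: (B ++ ['*', ')']) : List Char) = '(' :: ((B ++ ['*']) ++ [')']) := by simp
      rw [this]
      exact hz
    · rw [take_append_at _ hlen2]
      rw [htka]
      rw [htka] at hchain0
      exact hchain0


lemma getD_drop_zero (l : List Char) (m : Nat) (d : Char) : (l.drop m).getD 0 d = l.getD m d := by
  rcases Nat.lt_or_ge m l.length with h | h
  · rw [List.getD_eq_getElem _ _ (by simp; omega), List.getD_eq_getElem _ _ h]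
    simp
  · rw [List.drop_of_length_le h]
    rw [List.getD_eq_default _ _ (by simp), List.getD_eq_default _ _ (by omega)]

lemma getElem_append_cons (u t : List Char) (c : Char) :
    (u ++ c :: t)[u.length]'(by simp) = c := by
  rw [List.getElem_append_right (by simp)]
  simp

-- out ends in its single-character operand x (cases B = [] and B = [c'])
lemma getD_last_single {out : List Char} {x : Char} {last : Nat} (S : List Char)
    (hD : out.drop last = [x]) (hlast1 : last + 1 = out.length) :
    (out ++ '*' :: S).getD (out.length - 1) ' ' = x := by
  have h0 : out.getD last ' ' = x := by
    have h1 : (out.drop last).getD 0 ' ' = x := by rw [hD]; rfl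
    rwa [getD_drop_zero] at h1
  rw [List.getD_append _ _ _ _ (by omega), show out.length - 1 = last by omega]
  exact h0

lemma astep_single {out : List Char} {x : Char} {last : Nat} (S : List Char)
    (hD : out.drop last = [x]) (hlast1 : last + 1 = out.length) :
    (out ++ '*' :: S).take (out.length - 1) ++
      '(' :: (((out ++ '*' :: S).drop (out.length - 1)).take 2 ++
        ')' :: (out ++ '*' :: S).drop (out.length + 1)) =
    (out.take last ++ '(' :: (out.drop last ++ ['*', ')'])) ++ S := by
  have h1 : (out ++ '*' :: S).take (out.length - 1) = out.take last := by
    rw [List.take_append_of_le_length (by omega)]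
    congr 1
    omega
  have h2 : (out ++ '*' :: S).drop (out.length - 1) = [x] ++ '*' :: S := by
    rw [List.drop_append_of_le_length (by omega), show out.length - 1 = last by omega, hD]
  have h3 : (out ++ '*' :: S).drop (out.length + 1) = S := by
    rw [show out ++ '*' :: S = (out ++ ['*']) ++ S by simp]
    exact drop_append_at _ (by simp)
  rw [h1, h2, h3, hD]
  simp

-- out ends in a bracketed group: the backward scan finds the matching '('
lemma fob_group {out : List Char} {w : List Char} {a last : Nat} (S : List Char)
    (hw : Bal w)
    (hout : out = (out.take last ++ (List.replicate a '(' ++ ('(' :: w))) ++ [')'])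
    (hlentake : (out.take last).length = last) :
    findOpeningBracketIndexA (out ++ '*' :: S) (out.length - 1) = ((last + a : Nat) : Int) := by
  have hlen : out.length = last + a + w.length + 2 := by
    have hl := congrArg List.length hout
    simp [hlentake] at hl
    omega
  have htake : (out ++ '*' :: S).take (out.length - 1) =
      out.take last ++ (List.replicate a '(' ++ ('(' :: w)) := by
    rw [List.take_append_of_le_length (by omega)]
    conv_lhs => rw [hout]
    exact take_append_at _ (by simp [hlentake]; omega)
  unfold findOpeningBracketIndexA
  rw [htake]
  have hrev : (out.take last ++ (List.replicate a '(' ++ ('(' :: w))).reverse =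
      w.reverse ++ '(' :: ((List.replicate a '(').reverse ++ (out.take last).reverse) := by
    simp
  rw [hrev]
  rw [fobLoop_bal_reverse hw _ 0]
  push_cast
  omega

lemma astep_group {out : List Char} {w : List Char} {a last : Nat} (S : List Char)
    (hdec : out.drop last = List.replicate a '(' ++ ('(' :: (w ++ [')'])))
    (hlast : last ≤ out.length) :
    PySem.List.slice (out ++ '*' :: S) none (some ((last + a : Nat) : Int)) ++
      '(' :: (PySem.List.slice (out ++ '*' :: S) (some ((last + a : Nat) : Int))
                (some ((out.length : Int) + 1)) ++
        ')' :: (out ++ '*' :: S).drop (out.length + 1)) =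
    (out.take last ++ '(' :: (out.drop last ++ ['*', ')'])) ++ S := by
  have hlentake : (out.take last).length = last := by simp; omega
  have hlen : out.length = last + (a + w.length + 2) := by
    have h2 := congrArg List.length hdec
    simp at h2
    omega
  have hdropla : out.drop (last + a) = '(' :: (w ++ [')']) := by
    rw [← List.drop_drop, hdec, List.drop_append_of_le_length (by simp)]
    simp
  have h1 : PySem.List.slice (out ++ '*' :: S) none (some ((last + a : Nat) : Int)) =
      out.take (last + a) := by
    rw [PySem.List.slice_to_natCast, List.take_append_of_le_length (by omega)]
  have hcast : ((out.length : Int) + 1) = (((out.length + 1 : Nat)) : Int) := by push_cast; ring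
  have h2 : PySem.List.slice (out ++ '*' :: S) (some ((last + a : Nat) : Int))
      (some ((out.length : Int) + 1)) = ('(' :: (w ++ [')'])) ++ ['*'] := by
    rw [hcast, PySem.List.slice_natCast]
    rw [List.drop_append_of_le_length (by omega), hdropla]
    rw [show ('(' :: (w ++ [')']) ++ '*' :: S : List Char) = ('(' :: (w ++ [')']) ++ ['*']) ++ S by simp]
    rw [List.take_append_of_le_length (by simp; omega)]
    rw [List.take_of_length_le (by simp; omega)]
  have h3 : (out ++ '*' :: S).drop (out.length + 1) = S := by
    rw [show out ++ '*' :: S = (out ++ ['*']) ++ S by simp]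
    exact drop_append_at _ (by simp)
  rw [h1, h2, h3]
  -- reduce to insert_run
  have hrun := insert_run (z := '(' :: (w ++ [')'])) (p := last) (k := a) (by rw [hdec]) hlast
  calc out.take (last + a) ++ '(' :: ((('(' :: (w ++ [')'])) ++ ['*']) ++ ')' :: S)
      = (out.take (last + a) ++ '(' :: ('(' :: (w ++ [')']))) ++ ['*', ')'] ++ S := by simp
    _ = (out.take last ++ '(' :: out.drop last) ++ ['*', ')'] ++ S := by rw [← hdropla, hrun]
    _ = (out.take last ++ '(' :: (out.drop last ++ ['*', ')'])) ++ S := by simp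

lemma sbal_nonnil_stack {S : List Char} {stack : List Nat} (h : SBal (')' :: S) stack.length) :
    ∃ p rest, stack = p :: rest := by
  have := sbal_head_close h
  cases stack with
  | nil => simp at this
  | cons p rest => exact ⟨p, rest, rfl⟩

lemma main_lemma : ∀ (S out : List Char) (stack : List Nat) (last : Nat),
    out ≠ [] → BInv out stack last → SBal S stack.length →
    goA (out ++ S) out.length S.length = goB S out stack last := by
  intro S
  induction S with
  | nil => intro out stack last _ _ _; simp [goA, goB]
  | cons c S ih =>
    intro out stack last hout hinv hsbal
    have hlen0 : 0 < out.length := List.length_pos_iff.mpr hout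
    have hi : out.length < (out ++ c :: S).length := by simp
    have hget : ∀ (h : out.length < (out ++ c :: S).length),
        (out ++ c :: S)[out.length]'h = c := fun _ => getElem_append_cons ..
    obtain ⟨hstk, hlast, a, B, rest, hdec, hshape, hstack, hrest⟩ := hinv
    have hinv' : BInv out stack last := ⟨hstk, hlast, a, B, rest, hdec, hshape, hstack, hrest⟩
    rw [show (c :: S).length = S.length + 1 from rfl]
    by_cases hc : c = '*'
    · -- the star step: A wraps in place, B inserts at `last`
      subst hc
      simp only [goA]
      rw [dif_pos hi, hget, if_pos rfl]
      have hBeq : goB ('*' :: S) out stack last =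
          goB S ((PySem.List.insert out (last : Int) '(' ++ ['*']) ++ [')']) stack last := by
        simp [goB, hout]
      rw [hBeq]
      have hins : (PySem.List.insert out (last : Int) '(' ++ ['*']) ++ [')'] =
          out.take last ++ '(' :: (out.drop last ++ ['*', ')']) := by
        rw [PySem.List.insert_natCast out last '(' hlast]
        simp
      rw [hins]
      have hnewlen : (out.take last ++ '(' :: (out.drop last ++ ['*', ')'])).length = out.length + 3 := by
        simp
        omega
      have hnewne : out.take last ++ '(' :: (out.drop last ++ ['*', ')']) ≠ [] := by simp
      have hsbal' : SBal S stack.length := sbal_skip (by decide) (by decide) hsbal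
      have hIH := ih _ stack last hnewne (binv_wrap hinv') hsbal'
      rw [hnewlen] at hIH
      rcases hshape with ⟨ha, hB⟩ | ⟨ha, c', hB, hc1, hc2⟩ | ⟨w, hB, hw⟩
      · -- single-character operand '('
        subst hB ha
        have hD : out.drop last = ['('] := by simpa using hdec
        have hlast1 : last + 1 = out.length := by
          have := congrArg List.length hD
          simp at this
          omega
        rw [if_pos (by rw [getD_last_single S hD hlast1]; decide)]
        rw [astep_single S hD hlast1, hIH]
      · -- single-character ordinary operand
        subst hB ha
        have hD : out.drop last = [c'] := by simpa using hdec
        have hlast1 : last + 1 = out.length := by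
          have := congrArg List.length hD
          simp at this
          omega
        rw [if_pos (by rw [getD_last_single S hD hlast1]; simpa using hc2)]
        rw [astep_single S hD hlast1, hIH]
      · -- bracketed-group operand: A re-scans for the matching '('
        subst hB
        have hlentake : (out.take last).length = last := by simp; omega
        have hout3 : out = (out.take last ++ (List.replicate a '(' ++ ('(' :: w))) ++ [')'] := by
          conv_lhs => rw [← List.take_append_drop last out, hdec]
          simp
        have hgetd3 : (out ++ '*' :: S).getD (out.length - 1) ' ' = ')' := by
          rw [List.getD_append _ _ _ _ (by omega)]
          have hZ : ((out.take last ++ (List.replicate a '(' ++ ('(' :: w)))).length = out.length - 1 := by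
            have := congrArg List.length hout3
            simp [hlentake] at this ⊢
            omega
          have hgc := getD_append_cons_at (t := ([] : List Char)) (c := ')') (d := ' ') hZ
          rw [show ((out.take last ++ (List.replicate a '(' ++ ('(' :: w))) ++ ')' :: ([] : List Char)) =
                (out.take last ++ (List.replicate a '(' ++ ('(' :: w))) ++ [')'] from rfl, ← hout3] at hgc
          exact hgc
        rw [if_neg (by rw [hgetd3]; decide)]
        simp only [fob_group S hw hout3 hlentake]
        rw [astep_group S hdec hlast, hIH]
    · -- not a star: A only advances i
      have hAeq : goA (out ++ c :: S) out.length (S.length + 1) =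
          goA ((out ++ [c]) ++ S) (out ++ [c]).length S.length := by
        simp only [goA]
        rw [dif_pos hi, hget, if_neg hc]
        simp
      rw [hAeq]
      by_cases hcp : c = ')'
      · subst hcp
        obtain ⟨p, rest', rfl⟩ := sbal_nonnil_stack hsbal
        have hBeq : goB (')' :: S) out (p :: rest') last = goB S (out ++ [')']) rest' p := by
          simp [goB]
        rw [hBeq]
        exact ih (out ++ [')']) rest' p (by simp) (binv_app_close hinv')
          (by simpa using sbal_pop (by simpa using hsbal))
      · by_cases hco : c = '('
        · subst hco
          have hBeq : goB ('(' :: S) out stack last = goB S (out ++ ['(']) (out.length :: stack) out.length := by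
            simp [goB]
          rw [hBeq]
          exact ih (out ++ ['(']) (out.length :: stack) out.length (by simp) (binv_app_open hinv')
            (by simpa using sbal_push hsbal)
        · have hBeq : goB (c :: S) out stack last = goB S (out ++ [c]) stack out.length := by
            simp only [goB]
            rw [if_neg (by simp [hc]), if_neg hcp]
            simp [hco]
          rw [hBeq]
          exact ih (out ++ [c]) stack out.length (by simp) (binv_app_ord hco hcp hinv')
            (sbal_skip hco hcp hsbal)

lemma top_lemma (L : List Char)
    (hpre : ∀ n < L.length + 1, (L.take n).count ')' ≤ (L.take n).count '(') :
    goA L 1 (L.length - 1) = goB L [] [] 0 := by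
  have hsb : SBal L 0 := by
    intro n
    rcases Nat.lt_or_ge n (L.length + 1) with h | h
    · simpa using hpre n h
    · have h1 := hpre L.length (by omega)
      rw [List.take_of_length_le (le_refl _)] at h1
      rw [List.take_of_length_le (by omega)]
      simpa using h1
  cases L with
  | nil => simp [goA, goB]
  | cons c T =>
    rw [show (c :: T).length - 1 = T.length by simp]
    by_cases hc : c = ')'
    · exfalso
      subst hc
      have := hsb 1
      simp at this
    by_cases hco : c = '('
    · subst hco
      have hBeq : goB ('(' :: T) [] [] 0 = goB T ['('] [0] 0 := by simp [goB]
      rw [hBeq]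
      have hbinv : BInv ['('] [0] 0 := by
        refine ⟨⟨by simp, rfl, bal_nil, bal_nil⟩, by simp, 1, [], [], by simp [List.replicate],
          Or.inl ⟨rfl, rfl⟩, by simp, by simp⟩
      have := main_lemma T ['('] [0] 0 (by simp) hbinv (by simpa using sbal_push hsb)
      simpa using this
    · have hBeq : goB (c :: T) [] [] 0 = goB T [c] [] 0 := by simp [goB, hc, hco]
      rw [hBeq]
      have hbinv : BInv [c] [] 0 := by
        refine ⟨bal_single hco hc, by simp, 0, [c], [], by simp, 
          Or.inr (Or.inl ⟨rfl, c, rfl, hco, hc⟩), by simp, by simp⟩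
      have := main_lemma T [c] [] 0 (by simp) hbinv (sbal_skip hco hc hsb)
      simpa using this

-- ===== VERDICT (by name: the statement is the Claim_ definition above) =====
theorem convertStarPrority_spec : Claim_equal_convertStarPrority := by
  intro regex hdom hpre
  unfold Pre_convertStarPrority at hpre
  unfold Spec_convertStarPrority convertStarPrority convertStarPrority_alt
  exact congrArg String.ofList (top_lemma regex.toList hpre)
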